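-- pv_equiv track=rewrite | github.com/LorranSutter/advent-of-code | 2025/day03/main.py | pop_smaller_digits
-- ===== SOURCE A (Python) =====
-- from typing import List, Tuple
--
-- def pop_smaller_digits(
--     max_joltages: List[int],
--     digit: int,
--     current_joltage_id: int,
--     num_digits: int,
--     remaining_battery_digits: int,
-- ) -> int:
--     """
--     Remove smaller digits until we reach the first position
--     Returns the index of the joltage that can be replaced
--     """
--     for i in range(current_joltage_id, -1, -1):
--         # Prevents replacing more digits than available remaining battery digits
--         if num_digits - i > remaining_battery_digits:
--             break
--         # Stops if we find a greater digit
--         if digit <= max_joltages[i]: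
--             break
--         # Guarantees the next digit will always be smaller
--         if len(max_joltages) - 1 > i:
--             max_joltages[i + 1] = 0
--
--         max_joltages[i] = digit
--         current_joltage_id = i
--
--     return current_joltage_id
-- ===== SOURCE B (Python) =====
-- def pop_smaller_digits(
--     max_joltages,
--     digit,
--     current_joltage_id,
--     num_digits,
--     remaining_battery_digits,
-- ):
--     # Closed-form stop index: a single FORWARD pass with a max-accumulator.
--     # The backward scan of A stops at the largest index <= current_joltage_id that
--     # either violates the battery bound (i < num_digits - remaining_battery_digits)
--     # or holds a digit >= `digit`; so the landing index is the max of those bounds.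
--     lo = max(0, num_digits - remaining_battery_digits)
--     for i, v in enumerate(max_joltages[:max(current_joltage_id + 1, 0)]):
--         if digit <= v:
--             lo = max(lo, i + 1)
--     if lo > current_joltage_id:
--         # A's loop would not run a single iteration: nothing changes.
--         return current_joltage_id
--     # Net effect of A's writes: zeros above the landing index, digit at it.
--     for j in range(lo + 1, min(current_joltage_id + 2, len(max_joltages))):
--         max_joltages[j] = 0
--     max_joltages[lo] = digit
--     return lo
-- ===== Notes on version B (the rewrite author's own statement) =====
-- stated objective: alternative
-- what changed: B replaces A's backward scan with three interleaved break tests and in-place writes by a closed-form computation: one forward pass with a max-accumulator (landing index = max of the battery bound and 1 + the last blocking position), followed by a single write pass applying the net effect.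
-- outside the precondition, e.g. on pop_smaller_digits([1, 2], 5, 3, 2, 9): A raises IndexError, B returns 0
import Mathlib
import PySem

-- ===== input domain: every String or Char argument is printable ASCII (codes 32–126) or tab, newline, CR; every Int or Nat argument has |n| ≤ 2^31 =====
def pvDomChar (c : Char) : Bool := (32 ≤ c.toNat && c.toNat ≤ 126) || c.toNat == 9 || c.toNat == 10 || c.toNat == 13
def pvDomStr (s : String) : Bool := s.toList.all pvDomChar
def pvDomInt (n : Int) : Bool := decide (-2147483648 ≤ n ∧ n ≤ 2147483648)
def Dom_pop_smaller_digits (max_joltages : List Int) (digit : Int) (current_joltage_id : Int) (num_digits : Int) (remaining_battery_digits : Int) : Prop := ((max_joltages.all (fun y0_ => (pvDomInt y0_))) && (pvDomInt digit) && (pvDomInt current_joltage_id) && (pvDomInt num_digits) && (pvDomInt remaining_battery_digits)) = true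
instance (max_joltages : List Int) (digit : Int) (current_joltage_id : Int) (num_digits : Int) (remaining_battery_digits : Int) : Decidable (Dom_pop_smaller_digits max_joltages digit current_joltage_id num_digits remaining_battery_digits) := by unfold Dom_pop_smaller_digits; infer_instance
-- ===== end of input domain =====

-- B replaces A's backward scan with interleaved break tests and writes by a closed-form
-- landing index (a forward max-accumulator pass) plus one write pass (objective: alternative).
-- Both Pythons mutate max_joltages identically in place; the equivalence proved here is
-- about the RETURN value (the index) only.

-- ===== PORT A =====
-- A's loop over range(current_joltage_id, -1, -1); state = (mutated list, current_joltage_id).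
-- Where Python would raise IndexError (pyGet? = none) the port returns the current id; those
-- inputs are excluded by Pre_pop_smaller_digits.
def popLoopA (idxs : List Int) (a : List Int) (digit cji nd rb : Int) : Int :=
  match idxs with
  | [] => cji
  | i :: rest =>
    if nd - i > rb then cji
    else
      match PySem.List.pyGet? a i with
      | none => cji
      | some v =>
        if digit ≤ v then cji
        else
          let a1 := if (a.length : Int) - 1 > i then a.set (i + 1).toNat 0 else a
          let a2 := a1.set i.toNat digit
          popLoopA rest a2 digit i nd rb

def pop_smaller_digits (max_joltages : List Int) (digit : Int) (current_joltage_id : Int) (num_digits : Int) (remaining_battery_digits : Int) : Int :=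
  popLoopA (PySem.List.pyRange current_joltage_id (-1) (-1)) max_joltages digit current_joltage_id num_digits remaining_battery_digits

-- ===== PORT B =====
-- Source B: lo = max(0, nd - rb); one forward pass over enumerate(mj[:max(cji+1,0)]) taking
-- max(lo, i+1) at each blocking digit; then return cji if lo > cji else lo.
-- The write pass of Source B only mutates the list and does not influence the returned index,
-- which is what is ported here.
def pop_smaller_digits_alt (max_joltages : List Int) (digit : Int) (current_joltage_id : Int) (num_digits : Int) (remaining_battery_digits : Int) : Int :=
  let lo0 : Int := max 0 (num_digits - remaining_battery_digits)
  let lo : Int :=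
    (PySem.List.enumerate (PySem.List.slice max_joltages none (some (max (current_joltage_id + 1) 0)))).foldl
      (fun l p => if digit ≤ p.2 then max l (p.1 + 1) else l) lo0
  if lo > current_joltage_id then current_joltage_id else lo

-- ===== PRECONDITION & SPEC =====
-- Pre_ excludes exactly the inputs on which Python A raises IndexError: the first loop iteration
-- reads max_joltages[current_joltage_id] with current_joltage_id ≥ len(max_joltages).
def Pre_pop_smaller_digits (max_joltages : List Int) (digit : Int) (current_joltage_id : Int) (num_digits : Int) (remaining_battery_digits : Int) : Prop :=
  ¬ ((max_joltages.length : Int) ≤ current_joltage_id ∧ 0 ≤ current_joltage_id ∧ num_digits - current_joltage_id ≤ remaining_battery_digits)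
instance (max_joltages : List Int) (digit : Int) (current_joltage_id : Int) (num_digits : Int) (remaining_battery_digits : Int) : Decidable (Pre_pop_smaller_digits max_joltages digit current_joltage_id num_digits remaining_battery_digits) := by unfold Pre_pop_smaller_digits; infer_instance

def pvWitness_pop_smaller_digits : List Int × Int × Int × Int × Int := ([3, 1, 2], 5, 2, 3, 2)

def Spec_pop_smaller_digits (max_joltages : List Int) (digit : Int) (current_joltage_id : Int) (num_digits : Int) (remaining_battery_digits : Int) (out : Int) : Prop := out = pop_smaller_digits_alt max_joltages digit current_joltage_id num_digits remaining_battery_digits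
instance (max_joltages : List Int) (digit : Int) (current_joltage_id : Int) (num_digits : Int) (remaining_battery_digits : Int) (out : Int) : Decidable (Spec_pop_smaller_digits max_joltages digit current_joltage_id num_digits remaining_battery_digits out) := by unfold Spec_pop_smaller_digits; infer_instance

-- ===== CLAIM (what is proved, stated in full; the proofs are below) =====
def Claim_equal_pop_smaller_digits : Prop := ∀ (max_joltages : List Int) (digit : Int) (current_joltage_id : Int) (num_digits : Int) (remaining_battery_digits : Int), Dom_pop_smaller_digits max_joltages digit current_joltage_id num_digits remaining_battery_digits → Pre_pop_smaller_digits max_joltages digit current_joltage_id num_digits remaining_battery_digits → Spec_pop_smaller_digits max_joltages digit current_joltage_id num_digits remaining_battery_digits (pop_smaller_digits max_joltages digit current_joltage_id num_digits remaining_battery_digits)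

-- ===== LEMMAS AND PROOFS =====

-- Proof-only model of A's scan: the index where the backward scan stops.
def findStopB (a : List Int) (digit nd rb : Int) (lo : Int) : Int :=
  if _h : 0 ≤ lo then
    if nd - lo ≤ rb then
      match PySem.List.pyGet? a lo with
      | none => lo
      | some v => if digit > v then findStopB a digit nd rb (lo - 1) else lo
    else lo
  else lo
termination_by (lo + 1).toNat
decreasing_by omega

lemma findStopB_le (a : List Int) (digit nd rb lo : Int) : findStopB a digit nd rb lo ≤ lo := by
  fun_induction findStopB a digit nd rb lo <;> omega

-- Every index strictly between the stop index and the start passed all three tests.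
lemma findStopB_inv (a : List Int) (digit nd rb lo : Int) :
    ∀ j : Int, findStopB a digit nd rb lo < j → j ≤ lo →
      0 ≤ j ∧ nd - j ≤ rb ∧ ∃ v, PySem.List.pyGet? a j = some v ∧ digit > v := by
  suffices H : ∀ (n : Nat) (lo : Int), (lo + 1).toNat ≤ n →
      ∀ j : Int, findStopB a digit nd rb lo < j → j ≤ lo →
        0 ≤ j ∧ nd - j ≤ rb ∧ ∃ v, PySem.List.pyGet? a j = some v ∧ digit > v by
    exact H (lo + 1).toNat lo le_rfl
  intro n
  induction n with
  | zero =>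
    intro lo hlo
    rw [findStopB, dif_neg (by omega)]
    intro j h1 h2; omega
  | succ n ih =>
    intro lo hlo
    by_cases h0 : 0 ≤ lo
    · rw [findStopB, dif_pos h0]
      by_cases h1 : nd - lo ≤ rb
      · rw [if_pos h1]
        cases hv : PySem.List.pyGet? a lo with
        | none => dsimp only; intro j ha hb; omega
        | some v =>
          dsimp only
          by_cases h2 : digit > v
          · rw [if_pos h2]
            intro j hj1 hj2
            rcases lt_or_eq_of_le hj2 with h | h
            · exact ih (lo - 1) (by omega) j hj1 (by omega)
            · subst h; exact ⟨h0, h1, v, hv, h2⟩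
          · rw [if_neg h2]; intro j ha hb; omega
      · rw [if_neg h1]; intro j ha hb; omega
    · rw [findStopB, dif_neg h0]; intro j ha hb; omega

-- The stop index is the initial negative index, or it is ≥ 0 and fails one of the tests.
lemma findStopB_stop (a : List Int) (digit nd rb lo : Int) :
    findStopB a digit nd rb lo < 0 ∨
    (0 ≤ findStopB a digit nd rb lo ∧
      (nd - findStopB a digit nd rb lo > rb ∨
       PySem.List.pyGet? a (findStopB a digit nd rb lo) = none ∨
       ∃ v, PySem.List.pyGet? a (findStopB a digit nd rb lo) = some v ∧ digit ≤ v)) := by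
  suffices H : ∀ (n : Nat) (lo : Int), (lo + 1).toNat ≤ n →
      findStopB a digit nd rb lo < 0 ∨
      (0 ≤ findStopB a digit nd rb lo ∧
        (nd - findStopB a digit nd rb lo > rb ∨
         PySem.List.pyGet? a (findStopB a digit nd rb lo) = none ∨
         ∃ v, PySem.List.pyGet? a (findStopB a digit nd rb lo) = some v ∧ digit ≤ v)) by
    exact H (lo + 1).toNat lo le_rfl
  intro n
  induction n with
  | zero =>
    intro lo hlo
    rw [findStopB, dif_neg (by omega)]
    exact Or.inl (by omega)
  | succ n ih =>
    intro lo hlo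
    by_cases h0 : 0 ≤ lo
    · rw [findStopB, dif_pos h0]
      by_cases h1 : nd - lo ≤ rb
      · rw [if_pos h1]
        cases hv : PySem.List.pyGet? a lo with
        | none => dsimp only; exact Or.inr ⟨h0, Or.inr (Or.inl hv)⟩
        | some v =>
          dsimp only
          by_cases h2 : digit > v
          · rw [if_pos h2]
            exact ih (lo - 1) (by omega)
          · rw [if_neg h2]
            exact Or.inr ⟨h0, Or.inr (Or.inr ⟨v, hv, by omega⟩)⟩
      · rw [if_neg h1]; exact Or.inr ⟨h0, Or.inl (by omega)⟩
    · rw [findStopB, dif_neg h0]; exact Or.inl (by omega)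

-- A's interleaved loop, on any list agreeing with `orig` up to index lo, returns
-- cji if the scan stops immediately, else (stop index) + 1.
lemma pyGet?_set_lt (xs : List Int) (n : Nat) (v : Int) (j : Int) (h0 : 0 ≤ j) (hj : j < (n : Int)) :
    PySem.List.pyGet? (xs.set n v) j = PySem.List.pyGet? xs j := by
  rw [PySem.List.pyGet?_of_nonneg (h := h0), PySem.List.pyGet?_of_nonneg (h := h0)]
  rw [List.getElem?_set_ne (by omega)]

lemma loop_eq (lo : Int) (a orig : List Int) (digit cji nd rb : Int)
    (hagree : ∀ j : Int, 0 ≤ j → j ≤ lo → PySem.List.pyGet? a j = PySem.List.pyGet? orig j) :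
    popLoopA (PySem.List.pyRange lo (-1) (-1)) a digit cji nd rb =
      (if findStopB orig digit nd rb lo = lo then cji else findStopB orig digit nd rb lo + 1) := by
  suffices H : ∀ (n : Nat) (lo : Int), (lo + 1).toNat ≤ n → ∀ (a : List Int) (cji : Int),
      (∀ j : Int, 0 ≤ j → j ≤ lo → PySem.List.pyGet? a j = PySem.List.pyGet? orig j) →
      popLoopA (PySem.List.pyRange lo (-1) (-1)) a digit cji nd rb =
        (if findStopB orig digit nd rb lo = lo then cji
         else findStopB orig digit nd rb lo + 1) by
    exact H (lo + 1).toNat lo le_rfl a cji hagree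
  clear hagree a cji lo
  intro n
  induction n with
  | zero =>
    intro lo hlo a cji _
    have hneg : lo < 0 := by omega
    rw [PySem.List.pyRange_neg_one_eq_nil (by omega), findStopB, dif_neg (by omega)]
    simp [popLoopA]
  | succ n ih =>
    intro lo hlo a cji hag
    by_cases hneg : lo < 0
    · rw [PySem.List.pyRange_neg_one_eq_nil (by omega), findStopB, dif_neg (by omega)]
      simp [popLoopA]
    · have h0 : (0:Int) ≤ lo := by omega
      rw [PySem.List.pyRange_neg_one_cons (by omega : (-1:Int) < lo)]
      conv_rhs => rw [findStopB, dif_pos h0]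
      simp only [popLoopA]
      by_cases h1 : nd - lo > rb
      · rw [if_pos h1, if_neg (show ¬ (nd - lo ≤ rb) by omega)]
        simp
      · rw [if_neg h1, if_pos (show nd - lo ≤ rb by omega), hag lo h0 le_rfl]
        cases hv : PySem.List.pyGet? orig lo with
        | none => simp
        | some v =>
          dsimp only
          by_cases h2 : digit ≤ v
          · simp [h2, show ¬ (digit > v) by omega]
          · simp only [if_neg h2, if_pos (show digit > v by omega)]
            have hag2 : ∀ j : Int, 0 ≤ j → j ≤ lo - 1 →
                PySem.List.pyGet?
                  ((if (a.length : Int) - 1 > lo then a.set (lo + 1).toNat 0 else a).set lo.toNat digit) j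
                  = PySem.List.pyGet? orig j := by
              intro j hj hjl
              rw [pyGet?_set_lt _ _ _ _ hj (by omega)]
              split
              · rw [pyGet?_set_lt _ _ _ _ hj (by omega)]
                exact hag j hj (by omega)
              · exact hag j hj (by omega)
            have hf := findStopB_le orig digit nd rb (lo - 1)
            rw [ih (lo - 1) (by omega) _ lo hag2]
            split_ifs <;> omega

-- Characterization of B's forward max-accumulator fold over an enumerate.
lemma fold_char (digit : Int) (xs : List Int) : ∀ (s init : Int),
    init ≤ (PySem.List.enumerate xs s).foldl (fun l p => if digit ≤ p.2 then max l (p.1 + 1) else l) init ∧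
    (∀ k : Nat, (h : k < xs.length) → digit ≤ xs[k] →
      s + k + 1 ≤ (PySem.List.enumerate xs s).foldl (fun l p => if digit ≤ p.2 then max l (p.1 + 1) else l) init) ∧
    ((PySem.List.enumerate xs s).foldl (fun l p => if digit ≤ p.2 then max l (p.1 + 1) else l) init = init ∨
      ∃ k : Nat, ∃ h : k < xs.length, digit ≤ xs[k] ∧
        (PySem.List.enumerate xs s).foldl (fun l p => if digit ≤ p.2 then max l (p.1 + 1) else l) init = s + k + 1) := by
  induction xs with
  | nil => intro s init; simp [PySem.List.enumerate_nil]
  | cons x xs ih =>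
    intro s init
    rw [PySem.List.enumerate_cons]
    simp only [List.foldl_cons]
    by_cases hx : digit ≤ x
    · rw [if_pos hx]
      obtain ⟨h1, h2, h3⟩ := ih (s + 1) (max init (s + 1))
      refine ⟨le_trans (le_max_left _ _) h1, ?_, ?_⟩
      · intro k hk hks
        cases k with
        | zero => simpa using le_trans (le_max_right _ _) h1
        | succ k =>
          have := h2 k (by simpa using hk) (by simpa using hks)
          push_cast at this ⊢; omega
      · rcases h3 with h3 | ⟨k, hk, hks, h3⟩
        · by_cases h : init ≤ s + 1
          · exact Or.inr ⟨0, by simp, hx, by rw [h3]; push_cast; omega⟩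
          · exact Or.inl (by rw [h3]; omega)
        · exact Or.inr ⟨k + 1, by simpa using hk, by simpa using hks, by rw [h3]; push_cast; ring⟩
    · rw [if_neg hx]
      obtain ⟨h1, h2, h3⟩ := ih (s + 1) init
      refine ⟨h1, ?_, ?_⟩
      · intro k hk hks
        cases k with
        | zero => simp at hks; omega
        | succ k =>
          have := h2 k (by simpa using hk) (by simpa using hks)
          push_cast at this ⊢; omega
      · rcases h3 with h3 | ⟨k, hk, hks, h3⟩
        · exact Or.inl h3
        · exact Or.inr ⟨k + 1, by simpa using hk, by simpa using hks, by rw [h3]; push_cast; ring⟩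

-- ===== VERDICT (by name: the statement is the Claim_ definition above) =====
theorem pop_smaller_digits_spec : Claim_equal_pop_smaller_digits := by
  intro mj digit cji nd rb _ hpre
  unfold Spec_pop_smaller_digits pop_smaller_digits pop_smaller_digits_alt
  rw [loop_eq cji mj mj digit cji nd rb (fun _ _ _ => rfl)]
  dsimp only
  set f := findStopB mj digit nd rb cji with hfdef
  have hfle : f ≤ cji := findStopB_le mj digit nd rb cji
  have hinv := findStopB_inv mj digit nd rb cji
  have hstop := findStopB_stop mj digit nd rb cji
  rw [← hfdef] at hinv hstop
  have hb : (0:Int) ≤ max (cji + 1) 0 := le_max_right _ _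
  rw [show PySem.List.slice mj none (some (max (cji + 1) 0)) = mj.take (max (cji + 1) 0).toNat from PySem.List.slice_to mj hb]
  set m : Nat := (max (cji + 1) 0).toNat with hm
  have hmc : (m : Int) = max (cji + 1) 0 := by rw [hm]; exact Int.toNat_of_nonneg hb
  set L := (PySem.List.enumerate (mj.take m) 0).foldl
      (fun l p => if digit ≤ p.2 then max l (p.1 + 1) else l) (max 0 (nd - rb)) with hL
  obtain ⟨hc1, hc2, hc3⟩ := fold_char digit (mj.take m) 0 (max 0 (nd - rb))
  rw [← hL] at hc1 hc2 hc3
  by_cases hcase : f = cji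
  · -- A returns cji; show L > cji so B also returns cji
    rw [if_pos hcase]
    have hLgt : L > cji := by
      clear hc3
      rcases hstop with h | ⟨hf0, h | h | ⟨v, hv, hdv⟩⟩
      · omega
      · omega
      · -- out-of-range read at f = cji: by Pre_, the battery bound must fail at cji
        rw [hcase] at h hf0
        rw [PySem.List.pyGet?_of_nonneg (h := hf0)] at h
        have hlen : mj.length ≤ cji.toNat := List.getElem?_eq_none_iff.mp h
        have hcji : ((cji.toNat : Int)) = cji := Int.toNat_of_nonneg hf0
        have hndrb : nd - cji > rb := by
          by_contra hno
          exact hpre ⟨by omega, hf0, by omega⟩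
        omega
      · -- blocking digit at cji
        rw [hcase] at hv hf0
        rw [PySem.List.pyGet?_of_nonneg (h := hf0)] at hv
        obtain ⟨hlt, hval⟩ := List.getElem?_eq_some_iff.mp hv
        have hcji : ((cji.toNat : Int)) = cji := Int.toNat_of_nonneg hf0
        have hkm : cji.toNat < (mj.take m).length := by
          rw [List.length_take]; omega
        have hstep := hc2 cji.toNat hkm (by rw [List.getElem_take, hval]; exact hdv)
        push_cast at hstep
        omega
    rw [if_pos hLgt]
  · -- A returns f + 1; show L = f + 1 ≤ cji so B returns the same
    rw [if_neg hcase]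
    have hflt : f < cji := lt_of_le_of_ne hfle hcase
    have hf1 : 0 ≤ f + 1 := (hinv (f + 1) (by omega) (by omega)).1
    obtain ⟨w, hw, hdw⟩ := (hinv (f + 1) (by omega) (by omega)).2.2
    rw [PySem.List.pyGet?_of_nonneg (h := hf1)] at hw
    obtain ⟨hwlt, hwval⟩ := List.getElem?_eq_some_iff.mp hw
    have hf1c : (((f + 1).toNat : Int)) = f + 1 := Int.toNat_of_nonneg hf1
    -- f + 1 ≤ L
    have hub : f + 1 ≤ L := by
      clear hc3
      rcases hstop with h | ⟨hf0, h | h | ⟨v, hv, hdv⟩⟩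
      · omega
      · omega
      · -- impossible: index f + 1 is in range, so f is too
        exfalso
        rw [PySem.List.pyGet?_of_nonneg (h := hf0)] at h
        have hlen : mj.length ≤ f.toNat := List.getElem?_eq_none_iff.mp h
        have hfc : ((f.toNat : Int)) = f := Int.toNat_of_nonneg hf0
        omega
      · rw [PySem.List.pyGet?_of_nonneg (h := hf0)] at hv
        obtain ⟨hlt, hval⟩ := List.getElem?_eq_some_iff.mp hv
        have hfc : ((f.toNat : Int)) = f := Int.toNat_of_nonneg hf0
        have hkm : f.toNat < (mj.take m).length := by
          rw [List.length_take]; omega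
        have hstep := hc2 f.toNat hkm (by rw [List.getElem_take, hval]; exact hdv)
        push_cast at hstep
        omega
    -- L ≤ f + 1
    have hlb : L ≤ f + 1 := by
      have hbat := (hinv (f + 1) (by omega) (by omega)).2.1
      rcases hc3 with h | ⟨k, hk, hks, h⟩
      · omega
      · rw [List.length_take] at hk
        by_cases hkf : (k : Int) ≤ f
        · omega
        · exfalso
          have hkc : (k : Int) ≤ cji := by omega
          obtain ⟨_, _, v, hv, hdv⟩ := hinv k (by omega) hkc
          rw [PySem.List.pyGet?_of_nonneg (h := Int.natCast_nonneg k)] at hv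
          rw [Int.toNat_natCast] at hv
          obtain ⟨hlt, hval⟩ := List.getElem?_eq_some_iff.mp hv
          rw [List.getElem_take, hval] at hks
          omega
    have hLf : L = f + 1 := le_antisymm hlb hub
    rw [if_neg (by omega), hLf]
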